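-- pv_equiv track=rewrite | github.com/pypi-data/pypi-mirror-357 | packages/docxtpl-checker/docxtpl_checker-0.0.1-py3-none-any.whl/docxtpl_checker.py | find_location_for_line
-- ===== SOURCE A (Python) =====
-- from typing import Dict, List, Tuple
--
-- def find_location_for_line(content: Dict[str, str], target_line: int) -> str:
--     """Find which document section contains the target line number."""
--     current_line = 1
--     for location, text in content.items():
--         lines_in_section = text.count('\n') + 1
--         if current_line <= target_line < current_line + lines_in_section:
--             return location
--         current_line += lines_in_section
--     return "Document"  # fallback
-- ===== SOURCE B (Python) =====
-- from bisect import bisect_right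
--
-- def find_location_for_line(content, target_line):
--     """Find which document section contains the target line number."""
--     starts = [1]
--     locations = []
--     for location, text in content.items():
--         locations.append(location)
--         starts.append(starts[-1] + text.count('\n') + 1)
--     i = bisect_right(starts, target_line) - 1
--     if 0 <= i < len(locations):
--         return locations[i]
--     return "Document"
-- ===== Notes on version B (the rewrite author's own statement) =====
-- stated objective: alternative
-- what changed: B builds a prefix-sum table of section start lines plus a sentinel in one pass and answers the query with a single bisect_right lookup, instead of range-testing inside the scan.
import Mathlib
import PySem

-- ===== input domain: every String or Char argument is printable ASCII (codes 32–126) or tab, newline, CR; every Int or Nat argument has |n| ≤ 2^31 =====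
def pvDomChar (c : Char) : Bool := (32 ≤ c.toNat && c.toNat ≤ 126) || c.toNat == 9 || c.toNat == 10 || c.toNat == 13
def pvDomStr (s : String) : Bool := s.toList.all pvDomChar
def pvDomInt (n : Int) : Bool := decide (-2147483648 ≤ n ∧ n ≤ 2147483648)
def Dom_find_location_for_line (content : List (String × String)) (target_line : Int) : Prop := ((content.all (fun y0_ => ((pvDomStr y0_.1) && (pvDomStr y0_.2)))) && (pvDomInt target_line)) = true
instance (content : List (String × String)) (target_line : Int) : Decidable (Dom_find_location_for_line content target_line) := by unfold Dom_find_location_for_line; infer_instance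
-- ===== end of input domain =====

-- B builds a prefix-sum table of section start lines (with a sentinel) in one pass and
-- answers the query with a single bisect_right lookup; A range-tests inside the scan.

-- ===== PORT A =====
-- the 'for location, text in content.items()' loop with accumulator current_line
def findLocGo (content : List (String × String)) (target_line : Int) (current_line : Int) : String :=
  match content with
  | [] => "Document"
  | (location, text) :: rest =>
    let lines_in_section : Int := (PySem.Str.count text "\n" : Int) + 1
    if current_line ≤ target_line ∧ target_line < current_line + lines_in_section then
      location
    else
      findLocGo rest target_line (current_line + lines_in_section)

def find_location_for_line (content : List (String × String)) (target_line : Int) : String :=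
  findLocGo content target_line 1

-- ===== PORT B =====
-- the single table-building loop of Source B, appending to 'starts' and 'locations'
def bStep (acc : List Int × List String) (p : String × String) : List Int × List String :=
  (acc.1 ++ [acc.1.getLast! + (PySem.Str.count p.2 "\n" : Int) + 1], acc.2 ++ [p.1])

def find_location_for_line_alt (content : List (String × String)) (target_line : Int) : String :=
  let acc := content.foldl bStep ([1], [])
  -- bisect_right on the sorted table = number of leading elements ≤ target_line
  let i : Int := ((acc.1.takeWhile (fun s => decide (s ≤ target_line))).length : Int) - 1
  if 0 ≤ i ∧ i < (acc.2.length : Int) then acc.2[i.toNat]! else "Document"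

-- ===== PRECONDITION & SPEC =====
def Spec_find_location_for_line (content : List (String × String)) (target_line : Int) (out : String) : Prop := out = find_location_for_line_alt content target_line
instance (content : List (String × String)) (target_line : Int) (out : String) : Decidable (Spec_find_location_for_line content target_line out) := by unfold Spec_find_location_for_line; infer_instance

-- ===== CLAIM (what is proved, stated in full; the proofs are below) =====
def Claim_equal_find_location_for_line : Prop := ∀ (content : List (String × String)) (target_line : Int), Dom_find_location_for_line content target_line → Spec_find_location_for_line content target_line (find_location_for_line content target_line)

-- ===== LEMMAS AND PROOFS =====

-- the tail of the starts table after a section beginning at line c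
def tailStarts (c : Int) (content : List (String × String)) : List Int :=
  match content with
  | [] => []
  | (_, text) :: rest =>
    let c' := c + (PySem.Str.count text "\n" : Int) + 1
    c' :: tailStarts c' rest

-- B's post-table lookup, as a function of the two tables
def lookupB (starts : List Int) (locs : List String) (t : Int) : String :=
  let i : Int := ((starts.takeWhile (fun s => decide (s ≤ t))).length : Int) - 1
  if 0 ≤ i ∧ i < (locs.length : Int) then locs[i.toNat]! else "Document"

theorem getLast!_concat_int (st : List Int) (x : Int) : (st ++ [x]).getLast! = x := by
  induction st with
  | nil => rfl
  | cons a as ih =>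
    cases as with
    | nil => rfl
    | cons b bs => simp [List.getLast!]

theorem foldl_bStep (content : List (String × String)) :
    ∀ (st : List Int) (ls : List String), st ≠ [] →
      content.foldl bStep (st, ls) =
        (st ++ tailStarts (st.getLast!) content, ls ++ content.map Prod.fst) := by
  induction content with
  | nil => intro st ls _; simp [tailStarts]
  | cons p rest ih =>
    intro st ls hst
    obtain ⟨loc, text⟩ := p
    simp only [List.foldl_cons, bStep, tailStarts]
    rw [ih _ _ (by simp), getLast!_concat_int]
    simp

theorem findLocGo_of_lt (content : List (String × String)) (t : Int) :
    ∀ c : Int, t < c → findLocGo content t c = "Document" := by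
  induction content with
  | nil => intro c _; rfl
  | cons p rest ih =>
    intro c hc
    obtain ⟨loc, text⟩ := p
    simp only [findLocGo]
    rw [if_neg (by omega)]
    exact ih _ (by have : (0:Int) ≤ (PySem.Str.count text "\n" : Int) := Int.natCast_nonneg _; omega)

theorem lookupB_miss (c : Int) (starts : List Int) (locs : List String) (t : Int)
    (hc : ¬ c ≤ t) : lookupB (c :: starts) locs t = "Document" := by
  simp only [lookupB, List.takeWhile_cons, decide_eq_false hc]
  simp

theorem lookupB_hit (c s0 : Int) (tl : List Int) (loc : String) (locs : List String) (t : Int)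
    (hc : c ≤ t) (hs0 : ¬ s0 ≤ t) : lookupB (c :: s0 :: tl) (loc :: locs) t = loc := by
  simp only [lookupB, List.takeWhile_cons, decide_eq_true hc, decide_eq_false hs0]
  simp

theorem lookupB_shift (c s0 : Int) (tl : List Int) (loc : String) (locs : List String) (t : Int)
    (hc : c ≤ t) (hs0 : s0 ≤ t) :
    lookupB (c :: s0 :: tl) (loc :: locs) t = lookupB (s0 :: tl) locs t := by
  simp only [lookupB, List.takeWhile_cons, decide_eq_true hc, decide_eq_true hs0]
  simp only [if_true, List.length_cons]
  set k : Nat := (tl.takeWhile (fun s => decide (s ≤ t))).length with hk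
  have h1 : ((k + 1 + 1 : Nat) : Int) - 1 = ((k + 1 : Nat) : Int) := by push_cast; ring
  have h2 : ((k + 1 : Nat) : Int) - 1 = (k : Int) := by push_cast; ring
  rw [h1, h2]
  by_cases hlen : (k : Int) < (locs.length : Int)
  · rw [if_pos ⟨by positivity, by push_cast; omega⟩, if_pos ⟨by positivity, hlen⟩]
    have : ((k + 1 : Nat) : Int).toNat = k + 1 := by omega
    rw [this]
    have : ((k : Nat) : Int).toNat = k := by omega
    rw [this]
    simp
  · rw [if_neg (by push_cast; omega), if_neg (by omega)]

theorem findLocGo_eq_lookupB (content : List (String × String)) (t : Int) :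
    ∀ c : Int, findLocGo content t c = lookupB (c :: tailStarts c content) (content.map Prod.fst) t := by
  induction content with
  | nil =>
    intro c
    simp only [findLocGo, tailStarts, lookupB, List.map_nil, List.takeWhile]
    by_cases h : c ≤ t <;> simp [h]
  | cons p rest ih =>
    intro c
    obtain ⟨loc, text⟩ := p
    simp only [findLocGo, tailStarts, List.map_cons]
    by_cases h1 : c ≤ t
    · by_cases h2 : t < c + ((PySem.Str.count text "\n" : Int) + 1)
      · rw [if_pos ⟨h1, by omega⟩, lookupB_hit _ _ _ _ _ _ h1 (by omega)]
      · rw [if_neg (by omega), lookupB_shift _ _ _ _ _ _ h1 (by omega), ih,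
          show c + ((PySem.Str.count text "\n" : Int) + 1)
              = c + (PySem.Str.count text "\n" : Int) + 1 from by ring]
    · rw [if_neg (by omega), lookupB_miss _ _ _ _ h1,
        findLocGo_of_lt _ _ _ (by omega)]

-- ===== VERDICT (by name: the statement is the Claim_ definition above) =====
theorem find_location_for_line_spec : Claim_equal_find_location_for_line := by
  intro content t _
  show find_location_for_line content t = find_location_for_line_alt content t
  unfold find_location_for_line find_location_for_line_alt
  rw [foldl_bStep content [1] [] (by simp)]
  simp only [List.nil_append]
  have h1 : ([1] : List Int).getLast! = 1 := rfl
  rw [h1, List.singleton_append]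
  exact findLocGo_eq_lookupB content t 1
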